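-- pv_equiv track=rewrite | github.com/fgfalll/Desctop-organiser | modules/program_install.py | _sanitize_command_string
-- ===== SOURCE A (Python) =====
-- def _sanitize_command_string(command: str) -> str:
--     """
--     Sanitize command strings to prevent injection attacks.
--
--     Args:
--         command (str): Command string to sanitize
--
--     Returns:
--         str: Sanitized command string
--     """
--     if not command:
--         return ""
--
--     # Remove dangerous characters and patterns
--     dangerous_patterns = [
--         '&', '|', ';', '`', '$', '(', ')', '<', '>', '"', "'",
--         '..', '&&', '||', '>>', '<<'
--     ]
--
--     sanitized = command
--     for pattern in dangerous_patterns: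
--         sanitized = sanitized.replace(pattern, '')
--
--     # Normalize whitespace
--     sanitized = ' '.join(sanitized.split())
--
--     return sanitized
-- ===== SOURCE B (Python) =====
-- DANGEROUS_CHARS = "&|;`$()<>\"'"
--
--
-- def _sanitize_command_string(command: str) -> str:
--     if not command:
--         return ""
--     # One pass: drop every dangerous character.
--     sanitized = ''.join(c for c in command if c not in DANGEROUS_CHARS)
--     # Removing characters can create new '..'; one replace removes all occurrences
--     # (the multi-char patterns '&&', '||', '>>', '<<' are dead once their chars are gone).
--     sanitized = sanitized.replace('..', '')
--     return ' '.join(sanitized.split())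
-- ===== Notes on version B (the rewrite author's own statement) =====
-- stated objective: simpler
-- what changed: Replaces A's 16 sequential whole-string replace passes with one character-filter pass plus a single '..' replace (the two-char patterns '&&','||','>>','<<' in A are dead since their characters are already stripped), then the same whitespace normalization.
import Mathlib
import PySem

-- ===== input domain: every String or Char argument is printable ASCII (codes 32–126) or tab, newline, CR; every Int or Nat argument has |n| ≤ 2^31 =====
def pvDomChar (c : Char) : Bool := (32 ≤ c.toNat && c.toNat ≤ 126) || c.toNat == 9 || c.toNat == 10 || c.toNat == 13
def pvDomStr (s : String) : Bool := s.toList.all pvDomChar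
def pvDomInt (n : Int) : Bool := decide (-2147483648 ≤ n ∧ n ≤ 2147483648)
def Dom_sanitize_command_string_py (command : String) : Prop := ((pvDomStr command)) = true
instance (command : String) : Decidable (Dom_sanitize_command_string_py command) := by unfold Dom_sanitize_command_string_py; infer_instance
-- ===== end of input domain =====

-- B replaces A's 16 sequential whole-string replace passes with one character-filter
-- pass plus a single '..' replace and the same whitespace normalization (simpler).

-- ===== PORT A =====
def sanitize_command_string_py (command : String) : String :=
  if command = "" then ""
  else
    let dangerous_patterns : List String :=
      ["&", "|", ";", "`", "$", "(", ")", "<", ">", "\"", "'",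
       "..", "&&", "||", ">>", "<<"]
    let sanitized := dangerous_patterns.foldl (fun acc p => PySem.Str.replace acc p "") command
    PySem.Str.join " " (PySem.Str.split₀ sanitized)

-- ===== PORT B =====
def pvDangerousChars : List Char := "&|;`$()<>\"'".toList

def sanitize_command_string_py_alt (command : String) : String :=
  if command = "" then ""
  else
    let sanitized := String.ofList (command.toList.filter (fun c => !(pvDangerousChars.contains c)))
    let sanitized := PySem.Str.replace sanitized ".." ""
    PySem.Str.join " " (PySem.Str.split₀ sanitized)

-- ===== PRECONDITION & SPEC =====
def Spec_sanitize_command_string_py (command : String) (out : String) : Prop := out = sanitize_command_string_py_alt command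
instance (command : String) (out : String) : Decidable (Spec_sanitize_command_string_py command out) := by unfold Spec_sanitize_command_string_py; infer_instance

-- ===== CLAIM (what is proved, stated in full; the proofs are below) =====
def Claim_equal_sanitize_command_string_py : Prop := ∀ (command : String), Dom_sanitize_command_string_py command → Spec_sanitize_command_string_py command (sanitize_command_string_py command)

-- ===== LEMMAS AND PROOFS =====

-- replace by a single-character pattern (with empty replacement) is a filter
theorem repl_go_single (c : Char) : ∀ (fuel : Nat) (l acc : List Char), l.length ≤ fuel →
    PySem.Chars.replace.go [c] [] fuel l acc = acc.reverse ++ l.filter (fun x => x != c) := by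
  intro fuel
  induction fuel with
  | zero =>
    intro l acc h
    cases l with
    | nil => simp [PySem.Chars.replace.go]
    | cons a t => simp at h
  | succ fuel ih =>
    intro l acc h
    cases l with
    | nil => simp [PySem.Chars.replace.go]
    | cons a t =>
      by_cases hc : c = a
      · subst hc
        simp [PySem.Chars.replace.go, List.isPrefixOf]
        rw [ih t acc (by simpa using h)]
      · have hne : (c == a) = false := by simp [hc]
        simp [PySem.Chars.replace.go, List.isPrefixOf, hne]
        rw [ih t (a :: acc) (by simpa using Nat.le_of_succ_le_succ h)]
        simp [Ne.symm hc]

theorem repl_single (c : Char) (l : List Char) :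
    PySem.Chars.replace l [c] [] = l.filter (fun x => x != c) := by
  simpa using repl_go_single c l.length l [] (le_refl _)

-- replace by a pattern whose first character does not occur is the identity
theorem repl_go_dead (c₀ : Char) (p nw : List Char) : ∀ (fuel : Nat) (l acc : List Char), c₀ ∉ l →
    PySem.Chars.replace.go (c₀ :: p) nw fuel l acc = acc.reverse ++ l := by
  intro fuel
  induction fuel with
  | zero => intro l acc _; cases l <;> simp [PySem.Chars.replace.go]
  | succ fuel ih =>
    intro l acc h
    cases l with
    | nil => simp [PySem.Chars.replace.go]
    | cons a t =>
      have hne : (c₀ == a) = false := by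
        simp only [List.mem_cons, not_or] at h
        simpa using h.1
      simp [PySem.Chars.replace.go, List.isPrefixOf, hne]
      rw [ih t (a :: acc) (fun hm => h (List.mem_cons_of_mem _ hm))]
      simp

theorem repl_dead (c₀ : Char) (p nw l : List Char) (h : c₀ ∉ l) :
    PySem.Chars.replace l (c₀ :: p) nw = l := by
  simpa using repl_go_dead c₀ p nw l.length l [] h

-- the result of replace with empty replacement is a sublist of the input
theorem repl_go_sublist (old : List Char) : ∀ (fuel : Nat) (l acc : List Char),
    List.Sublist (PySem.Chars.replace.go old [] fuel l acc) (acc.reverse ++ l) := by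
  intro fuel
  induction fuel with
  | zero => intro l acc; cases l <;> simp [PySem.Chars.replace.go]
  | succ fuel ih =>
    intro l acc
    cases l with
    | nil => simp [PySem.Chars.replace.go]
    | cons a t =>
      by_cases hp : old.isPrefixOf (a :: t)
      · simp only [PySem.Chars.replace.go, hp, if_true]
        refine (ih _ _).trans ?_
        simp only [List.reverse_nil, List.nil_append]
        exact (List.append_sublist_append_left _).2 (List.drop_sublist _ _)
      · simp only [PySem.Chars.replace.go, hp]
        refine (ih t (a :: acc)).trans ?_
        simp
  
theorem mem_repl (old l : List Char) (ho : old ≠ []) {c : Char}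
    (h : c ∈ PySem.Chars.replace l old []) : c ∈ l := by
  unfold PySem.Chars.replace at h
  rw [if_neg (by simpa using ho)] at h
  have hs := repl_go_sublist old l.length l []
  simp only [List.reverse_nil, List.nil_append] at hs
  exact hs.subset h

theorem toList_ofList (l : List Char) : (String.ofList l).toList = l := by simp

-- collapsing the eleven single-character filters into one membership filter
theorem filter_chain (l : List Char) :
    ((((((((((l.filter (fun x => x != '&')).filter (fun x => x != '|')).filter (fun x => x != ';')).filter
        (fun x => x != '`')).filter (fun x => x != '$')).filter (fun x => x != '(')).filter
        (fun x => x != ')')).filter (fun x => x != '<')).filter (fun x => x != '>')).filter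
        (fun x => x != '"')).filter (fun x => x != '\'')
    = l.filter (fun c => !(pvDangerousChars.contains c)) := by
  simp only [List.filter_filter]
  apply List.filter_congr
  intro c _
  simp [pvDangerousChars, bne]
  ac_rfl

theorem chars_main (l : List Char) :
    PySem.Chars.replace (PySem.Chars.replace (PySem.Chars.replace (PySem.Chars.replace (PySem.Chars.replace (PySem.Chars.replace (PySem.Chars.replace (PySem.Chars.replace (PySem.Chars.replace (PySem.Chars.replace (PySem.Chars.replace (PySem.Chars.replace (PySem.Chars.replace (PySem.Chars.replace (PySem.Chars.replace (PySem.Chars.replace l ['&'] []) ['|'] []) [';'] []) ['`'] []) ['$'] []) ['('] []) [')'] []) ['<'] []) ['>'] []) ['"'] []) ['\''] []) ['.', '.'] []) ['&', '&'] []) ['|', '|'] []) ['>', '>'] []) ['<', '<'] []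
    = PySem.Chars.replace (l.filter (fun c => !(pvDangerousChars.contains c))) ['.', '.'] [] := by
  simp only [repl_single]
  rw [filter_chain]
  have hnot : ∀ c : Char, pvDangerousChars.contains c = true →
      c ∉ PySem.Chars.replace (l.filter (fun c => !(pvDangerousChars.contains c))) ['.', '.'] [] := by
    intro c hd hm
    have h1 := mem_repl ['.', '.'] _ (by simp) hm
    rw [List.mem_filter, hd] at h1
    simp at h1
  rw [repl_dead '&' ['&'] [] _ (hnot '&' (by decide)),
      repl_dead '|' ['|'] [] _ (hnot '|' (by decide)),
      repl_dead '>' ['>'] [] _ (hnot '>' (by decide)),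
      repl_dead '<' ['<'] [] _ (hnot '<' (by decide))]

-- ===== VERDICT (by name: the statement is the Claim_ definition above) =====
theorem sanitize_command_string_py_spec : Claim_equal_sanitize_command_string_py := by
  intro command _
  unfold Spec_sanitize_command_string_py sanitize_command_string_py sanitize_command_string_py_alt
  by_cases hc : command = ""
  · simp [hc]
  · rw [if_neg hc, if_neg hc]
    simp only [List.foldl_cons, List.foldl_nil, PySem.Str.replace, toList_ofList]
    simp only [show ("&" : String).toList = ['&'] from rfl,
      show ("|" : String).toList = ['|'] from rfl,
      show (";" : String).toList = [';'] from rfl,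
      show ("`" : String).toList = ['`'] from rfl,
      show ("$" : String).toList = ['$'] from rfl,
      show ("(" : String).toList = ['('] from rfl,
      show (")" : String).toList = [')'] from rfl,
      show ("<" : String).toList = ['<'] from rfl,
      show (">" : String).toList = ['>'] from rfl,
      show ("\"" : String).toList = ['"'] from rfl,
      show ("'" : String).toList = ['\''] from rfl,
      show (".." : String).toList = ['.', '.'] from rfl,
      show ("&&" : String).toList = ['&', '&'] from rfl,
      show ("||" : String).toList = ['|', '|'] from rfl,
      show (">>" : String).toList = ['>', '>'] from rfl,
      show ("<<" : String).toList = ['<', '<'] from rfl,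
      show ("" : String).toList = ([] : List Char) from rfl]
    rw [chars_main]
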